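-- pv_equiv track=rewrite | github.com/NeuralTechAi/DataGrabber | app/services/ai_service.py | _merge_page_results
-- ===== SOURCE A (Python) =====
-- def _merge_page_results(page_results: list, fields: list) -> dict:
--     """Merge per-page extraction dicts into one, taking first non-'Not found' value."""
--     merged = {f["name"]: "Not found" for f in fields}
--     for page_data in page_results:
--         if not isinstance(page_data, dict):
--             continue
--         for f in fields:
--             name = f["name"]
--             val = page_data.get(name, "Not found")
--             if merged[name] == "Not found" and val and val != "Not found":
--                 merged[name] = val
--     return merged
-- ===== SOURCE B (Python) =====
-- def _merge_page_results(page_results: list, fields: list) -> dict: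
--     """Merge per-page extraction dicts into one, taking first non-'Not found' value.
--
--     Field-major rewrite: for each field name, scan the pages once and stop at the
--     first usable (truthy, non-'Not found') value.
--     """
--     pages = [p for p in page_results if isinstance(p, dict)]
--
--     def first_value(name):
--         for p in pages:
--             v = p.get(name, "Not found")
--             if v and v != "Not found":
--                 return v
--         return "Not found"
--
--     return {f["name"]: first_value(f["name"]) for f in fields}
-- ===== Notes on version B (the rewrite author's own statement) =====
-- stated objective: alternative
-- what changed: Replaced the page-major double sweep with a 'merged[name] == Not found' re-check by a field-major dict comprehension that scans pages once per field and early-stops at the first truthy non-'Not found' value.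
import Mathlib
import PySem

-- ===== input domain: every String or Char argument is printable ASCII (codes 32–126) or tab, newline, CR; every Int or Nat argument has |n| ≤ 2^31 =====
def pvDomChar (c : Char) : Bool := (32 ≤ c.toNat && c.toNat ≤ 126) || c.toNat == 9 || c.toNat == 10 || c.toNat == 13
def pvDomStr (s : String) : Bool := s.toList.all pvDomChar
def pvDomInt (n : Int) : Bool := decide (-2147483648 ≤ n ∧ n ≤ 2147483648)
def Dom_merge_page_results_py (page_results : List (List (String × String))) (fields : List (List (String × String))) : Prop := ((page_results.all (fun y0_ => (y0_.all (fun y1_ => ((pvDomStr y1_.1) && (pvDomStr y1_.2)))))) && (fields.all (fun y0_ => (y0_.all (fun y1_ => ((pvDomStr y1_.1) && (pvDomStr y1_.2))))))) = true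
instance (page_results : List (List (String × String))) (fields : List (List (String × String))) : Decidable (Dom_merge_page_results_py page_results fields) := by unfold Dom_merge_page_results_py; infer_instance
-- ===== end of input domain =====

-- B rewrites A field-major: one early-stopping scan of the pages per field instead of
-- A's page-major double sweep with a 'merged[name] == "Not found"' re-check (alternative decomposition, same worst-case cost).

-- shared accessors: f["name"] (total fallback "" is only reachable outside Pre_, where Python raises KeyError)
def pvFieldName (f : List (String × String)) : String := ((PySem.Dict.mk f).get? "name").getD ""
-- page_data.get(name, "Not found")
def pvVal (page : List (String × String)) (name : String) : String :=
  (PySem.Dict.mk page).getD name "Not found"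

-- ===== PORT A =====
-- inner 'for f in fields' loop of A (merged[name] is always present, so getD is exact here)
def pvInner (fields : List (List (String × String))) (page_data : List (String × String))
    (merged : PySem.Dict String String) : PySem.Dict String String :=
  fields.foldl (fun merged f =>
    let name := pvFieldName f
    let val := pvVal page_data name
    if merged.getD name "Not found" = "Not found" ∧ val ≠ "" ∧ val ≠ "Not found" then
      merged.insert name val
    else merged) merged

-- the 'isinstance(page_data, dict)' skip is the identity under the type convention (every page IS a dict)
def merge_page_results_py (page_results : List (List (String × String))) (fields : List (List (String × String))) : List (String × String) :=
  let merged0 : PySem.Dict String String :=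
    fields.foldl (fun d f => d.insert (pvFieldName f) "Not found") PySem.Dict.empty
  (page_results.foldl (fun merged page_data => pvInner fields page_data merged) merged0).items

-- ===== PORT B =====
-- first_value(name): first truthy non-'Not found' value among the pages, else "Not found"
def pvFirstValue (pages : List (List (String × String))) (name : String) : String :=
  match pages with
  | [] => "Not found"
  | p :: rest =>
    let v := pvVal p name
    if v ≠ "" ∧ v ≠ "Not found" then v else pvFirstValue rest name

-- 'pages = [p for p in page_results if isinstance(p, dict)]' is the identity under the type convention
def merge_page_results_py_alt (page_results : List (List (String × String))) (fields : List (List (String × String))) : List (String × String) :=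
  (fields.foldl (fun d f => d.insert (pvFieldName f) (pvFirstValue page_results (pvFieldName f)))
    PySem.Dict.empty).items

-- ===== PRECONDITION & SPEC =====
-- Pre_ excludes exactly the inputs on which Python raises KeyError: a field dict without the key "name" (f["name"]).
def Pre_merge_page_results_py (page_results : List (List (String × String))) (fields : List (List (String × String))) : Prop :=
  ∀ f ∈ fields, (PySem.Dict.mk f).contains "name" = true
instance (page_results : List (List (String × String))) (fields : List (List (String × String))) : Decidable (Pre_merge_page_results_py page_results fields) := by unfold Pre_merge_page_results_py; infer_instance

def pvWitness_merge_page_results_py : (List (List (String × String))) × (List (List (String × String))) :=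
  ([[("title", "X")], [("title", "Not found")]], [[("name", "title")], [("name", "author")]])

def Spec_merge_page_results_py (page_results : List (List (String × String))) (fields : List (List (String × String))) (out : List (String × String)) : Prop := out = merge_page_results_py_alt page_results fields
instance (page_results : List (List (String × String))) (fields : List (List (String × String))) (out : List (String × String)) : Decidable (Spec_merge_page_results_py page_results fields out) := by unfold Spec_merge_page_results_py; infer_instance

-- ===== CLAIM (what is proved, stated in full; the proofs are below) =====
def Claim_equal_merge_page_results_py : Prop := ∀ (page_results : List (List (String × String))) (fields : List (List (String × String))), Dom_merge_page_results_py page_results fields → Pre_merge_page_results_py page_results fields → Spec_merge_page_results_py page_results fields (merge_page_results_py page_results fields)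

-- ===== LEMMAS AND PROOFS =====

-- get? through a fold of inserts whose value depends only on the key
theorem pv_get?_build (fields : List (List (String × String))) (d : PySem.Dict String String)
    (g : String → String) (n : String) :
    (fields.foldl (fun d f => d.insert (pvFieldName f) (g (pvFieldName f))) d).get? n
      = if n ∈ fields.map pvFieldName then some (g n) else d.get? n := by
  induction fields generalizing d with
  | nil => simp
  | cons f fs ih =>
    simp only [List.foldl_cons, List.map_cons, List.mem_cons]
    rw [ih]
    by_cases h1 : n ∈ fs.map pvFieldName
    · simp [h1]
    · by_cases h2 : n = pvFieldName f
      · simp [h1, h2, PySem.Dict.get?_insert]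
      · simp [h1, h2, PySem.Dict.get?_insert]

-- pv_get?_build specialised to the constant value "Not found" (A's initialisation loop)
theorem pv_get?_build_const (fields : List (List (String × String))) (d : PySem.Dict String String)
    (n : String) :
    (fields.foldl (fun d f => d.insert (pvFieldName f) "Not found") d).get? n
      = if n ∈ fields.map pvFieldName then some "Not found" else d.get? n :=
  pv_get?_build fields d (fun _ => "Not found") n

theorem pv_contains_pvInner (fields : List (List (String × String))) (p : List (String × String))
    (d : PySem.Dict String String) (k : String) (h : d.contains k = true) :
    (pvInner fields p d).contains k = true := by
  induction fields generalizing d with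
  | nil => exact h
  | cons f fs ih =>
    simp only [pvInner, List.foldl_cons] at *
    split
    · exact ih _ (by simp [PySem.Dict.contains_insert, h])
    · exact ih _ h

theorem pv_keys_pvInner (fields' : List (List (String × String))) (p : List (String × String))
    (d : PySem.Dict String String) (h : ∀ f ∈ fields', d.contains (pvFieldName f) = true) :
    (pvInner fields' p d).keys = d.keys := by
  induction fields' generalizing d with
  | nil => rfl
  | cons f fs ih =>
    simp only [pvInner, List.foldl_cons] at *
    split
    · rw [ih _ (fun f' hf' => by
        simp [PySem.Dict.contains_insert, h f' (List.mem_cons_of_mem _ hf')])]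
      exact PySem.Dict.keys_insert_of_contains _ _ (h f (List.mem_cons_self ..))
    · exact ih _ (fun f' hf' => h f' (List.mem_cons_of_mem _ hf'))

theorem pv_get?_pvInner (fields : List (List (String × String))) (p : List (String × String))
    (d : PySem.Dict String String) (n : String) (v : String) (h : d.get? n = some v) :
    (pvInner fields p d).get? n
      = some (if n ∈ fields.map pvFieldName ∧ v = "Not found" ∧ pvVal p n ≠ "" ∧ pvVal p n ≠ "Not found"
              then pvVal p n else v) := by
  induction fields generalizing d v with
  | nil => simpa using h
  | cons f fs ih =>
    simp only [pvInner, List.foldl_cons] at *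
    have hstep : (if d.getD (pvFieldName f) "Not found" = "Not found" ∧
          pvVal p (pvFieldName f) ≠ "" ∧ pvVal p (pvFieldName f) ≠ "Not found"
        then d.insert (pvFieldName f) (pvVal p (pvFieldName f)) else d).get? n
        = some (if n = pvFieldName f ∧ v = "Not found" ∧ pvVal p n ≠ "" ∧ pvVal p n ≠ "Not found"
                then pvVal p n else v) := by
      by_cases hn : n = pvFieldName f
      · subst hn
        have hd : d.getD (pvFieldName f) "Not found" = v := PySem.Dict.getD_of_get?_eq_some _ _ h
        rw [hd]
        split
        · next hc => rw [PySem.Dict.get?_insert_self]; simp [hc.1, hc.2.1, hc.2.2]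
        · next hc => rw [h]; simp [hc]
      · split
        · rw [PySem.Dict.get?_insert_of_ne _ _ hn, h]; simp [hn]
        · rw [h]; simp [hn]
    rw [ih _ _ hstep]
    congr 1
    by_cases hn : n = pvFieldName f
    · subst hn
      by_cases hc : v = "Not found" ∧ pvVal p (pvFieldName f) ≠ "" ∧ pvVal p (pvFieldName f) ≠ "Not found"
      · simp [hc.1, hc.2.1, hc.2.2]
      · simp [hc]
    · simp [hn]

theorem pv_get?_outer (pages fields : List (List (String × String))) (d : PySem.Dict String String)
    (n : String) (v : String) (h : d.get? n = some v) :
    (pages.foldl (fun merged page_data => pvInner fields page_data merged) d).get? n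
      = some (if n ∈ fields.map pvFieldName ∧ v = "Not found" then pvFirstValue pages n else v) := by
  induction pages generalizing d v with
  | nil =>
    rw [List.foldl_nil, h]
    congr 1
    split
    · next hcond => simp [pvFirstValue, hcond.2]
    · rfl
  | cons p ps ih =>
    simp only [List.foldl_cons]
    rw [ih _ _ (pv_get?_pvInner fields p d n v h)]
    by_cases hm : n ∈ fields.map pvFieldName
    · by_cases hv : v = "Not found"
      · by_cases hg : pvVal p n ≠ "" ∧ pvVal p n ≠ "Not found"
        · simp [pvFirstValue, hm, hv, hg, hg.2]
        · simp [pvFirstValue, hm, hv, hg]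
      · simp [hm, hv]
    · simp [hm]

theorem pv_keys_outer (pages fields : List (List (String × String))) (d : PySem.Dict String String)
    (h : ∀ f ∈ fields, d.contains (pvFieldName f) = true) :
    (pages.foldl (fun merged page_data => pvInner fields page_data merged) d).keys = d.keys := by
  induction pages generalizing d with
  | nil => rfl
  | cons p ps ih =>
    simp only [List.foldl_cons]
    rw [ih _ (fun f hf => pv_contains_pvInner _ _ _ _ (h f hf)), pv_keys_pvInner fields p d h]

-- ===== VERDICT (by name: the statement is the Claim_ definition above) =====
theorem merge_page_results_py_spec : Claim_equal_merge_page_results_py := by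
  intro pr fields _ _
  unfold Spec_merge_page_results_py merge_page_results_py merge_page_results_py_alt
  set merged0 : PySem.Dict String String :=
    fields.foldl (fun d f => d.insert (pvFieldName f) "Not found") PySem.Dict.empty with hm0
  set B : PySem.Dict String String :=
    fields.foldl (fun d f => d.insert (pvFieldName f) (pvFirstValue pr (pvFieldName f))) PySem.Dict.empty with hB
  set A : PySem.Dict String String := pr.foldl (fun merged page_data => pvInner fields page_data merged) merged0 with hA
  have hm0keys : merged0.keys = PySem.Set.update PySem.Dict.empty.keys (fields.map pvFieldName) :=
    PySem.Dict.keys_foldl_insert_key fields pvFieldName (fun _ _ => "Not found") PySem.Dict.empty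
  have hBkeys : B.keys = PySem.Set.update PySem.Dict.empty.keys (fields.map pvFieldName) :=
    PySem.Dict.keys_foldl_insert_key fields pvFieldName (fun _ f => pvFirstValue pr (pvFieldName f)) PySem.Dict.empty
  have hm0contains : ∀ f ∈ fields, merged0.contains (pvFieldName f) = true := by
    intro f hf
    have hmem : pvFieldName f ∈ fields.map pvFieldName := List.mem_map_of_mem hf
    rw [PySem.Dict.contains_eq_isSome_get?, hm0, pv_get?_build_const]
    simp [hmem]
  have hAkeys : A.keys = merged0.keys := pv_keys_outer pr fields merged0 hm0contains
  have hAnodup : A.keys.Nodup := by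
    rw [hAkeys, hm0]
    exact PySem.Dict.nodup_keys_foldl_insert_key fields pvFieldName (fun _ _ => "Not found") PySem.Dict.empty PySem.Dict.nodup_keys_empty
  have hBnodup : B.keys.Nodup := by
    rw [hB]
    exact PySem.Dict.nodup_keys_foldl_insert_key fields pvFieldName (fun _ f => pvFirstValue pr (pvFieldName f)) PySem.Dict.empty PySem.Dict.nodup_keys_empty
  rw [PySem.Dict.items_eq_map_keys A hAnodup "Not found",
      PySem.Dict.items_eq_map_keys B hBnodup "Not found"]
  rw [hAkeys, hm0keys, ← hBkeys]
  apply List.map_congr_left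
  intro k hk
  have hkmem : k ∈ fields.map pvFieldName := by
    rw [hBkeys, PySem.Dict.keys_empty] at hk
    simp only [PySem.Set.update] at hk
    rw [← PySem.Set.ofList_eq_foldl, PySem.Set.mem_ofList] at hk
    exact hk
  have hm0get : merged0.get? k = some "Not found" := by
    rw [hm0, pv_get?_build_const]; simp [hkmem]
  have hAget : A.get? k = some (pvFirstValue pr k) := by
    rw [hA, pv_get?_outer pr fields merged0 k "Not found" hm0get]
    simp [hkmem]
  have hBget : B.get? k = some (pvFirstValue pr k) := by
    rw [hB, pv_get?_build fields PySem.Dict.empty (pvFirstValue pr) k]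
    simp [hkmem]
  rw [PySem.Dict.getD_eq_get?_getD, PySem.Dict.getD_eq_get?_getD, hAget, hBget]
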